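-- pv_equiv track=rewrite | github.com/Aveheuzed/compress | new/bwt.py | _max_id_letters
-- ===== SOURCE A (Python) =====
-- def _max_id_letters(string):
--         """This function returns the max number of consecutive letters in string
--         ex : b'world' => 1
--         b'hello world' => 2 bc. 'll'"""
--         i = 0
--         last = -1
--         j = 0
--         for x in string :
--                 if x == last :
--                         j += 1
--                 else :
--                         j = 1
--                         last = x
--
--                 if j > i :
--                         i = j
--         return i
-- ===== SOURCE B (Python) =====
-- def _max_id_letters(string):
--         """Max number of consecutive equal letters in string.
--         Re-implementation: split the input into maximal runs of equal
--         elements with a two-pointer, two-level loop and take the longest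
--         run, instead of maintaining running counters last/j/i in one pass."""
--         best = 0
--         n = len(string)
--         k = 0
--         while k < n:
--                 c = string[k]
--                 j = k + 1
--                 while j < n and string[j] == c:
--                         j += 1
--                 if j - k > best:
--                         best = j - k
--                 k = j
--         return best
-- ===== Notes on version B (the rewrite author's own statement) =====
-- stated objective: alternative
-- what changed: Replaces A's single pass with hand-maintained counters last/j/i by a two-level loop that splits the input into maximal runs of equal characters and keeps the longest run length.
import Mathlib
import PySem

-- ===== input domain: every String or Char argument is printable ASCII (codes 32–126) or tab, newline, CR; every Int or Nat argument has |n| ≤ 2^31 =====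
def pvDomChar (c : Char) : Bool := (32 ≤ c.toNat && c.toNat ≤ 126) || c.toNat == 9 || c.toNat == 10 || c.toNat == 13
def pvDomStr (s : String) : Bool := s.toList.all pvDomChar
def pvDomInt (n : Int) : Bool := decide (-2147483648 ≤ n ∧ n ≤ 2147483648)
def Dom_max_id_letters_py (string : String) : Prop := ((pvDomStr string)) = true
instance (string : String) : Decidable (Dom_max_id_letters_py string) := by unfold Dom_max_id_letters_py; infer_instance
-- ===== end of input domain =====

-- B restructures A's single pass with running counters (last/j/i) into a
-- two-level loop that splits the input into maximal runs of equal characters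
-- and keeps the longest run; objective: alternative decomposition, same cost.

-- ===== PORT A =====
-- A's state: (i, last, j); Python's sentinel last = -1 never equals a character,
-- so it is ported as `none` in an Option Char.
def aStep (st : Int × Option Char × Int) (x : Char) : Int × Option Char × Int :=
  let p := if st.2.1 = some x then (st.2.2 + 1, st.2.1) else ((1 : Int), some x)
  (if p.1 > st.1 then p.1 else st.1, p.2, p.1)

def max_id_letters_py (string : String) : Int :=
  (string.toList.foldl aStep (0, none, 0)).1

-- ===== PORT B =====
-- inner while loop of Source B: consume the prefix of equal characters,
-- returning (number consumed, remaining suffix)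
def bRun (c : Char) : List Char → Int × List Char
  | [] => (0, [])
  | x :: xs => if x = c then let p := bRun c xs; (p.1 + 1, p.2) else (0, x :: xs)

theorem bRun_length_le (c : Char) : ∀ cs : List Char, (bRun c cs).2.length ≤ cs.length := by
  intro cs
  induction cs with
  | nil => simp [bRun]
  | cons x xs ih =>
    by_cases h : x = c
    · simp only [bRun, if_pos h]
      exact Nat.le_succ_of_le ih
    · simp [bRun, if_neg h]

-- outer while loop of Source B, with accumulator best
def bGo : List Char → Int → Int
  | [], best => best
  | c :: cs, best =>
      let p := bRun c cs
      bGo p.2 (if p.1 + 1 > best then p.1 + 1 else best)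
termination_by cs => cs.length
decreasing_by
  exact Nat.lt_succ_of_le (bRun_length_le c cs)

def max_id_letters_py_alt (string : String) : Int :=
  bGo string.toList 0

-- ===== PRECONDITION & SPEC =====
def Spec_max_id_letters_py (string : String) (out : Int) : Prop := out = max_id_letters_py_alt string
instance (string : String) (out : Int) : Decidable (Spec_max_id_letters_py string out) := by unfold Spec_max_id_letters_py; infer_instance

-- ===== CLAIM (what is proved, stated in full; the proofs are below) =====
def Claim_equal_max_id_letters_py : Prop := ∀ (string : String), Dom_max_id_letters_py string → Spec_max_id_letters_py string (max_id_letters_py string)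

-- ===== LEMMAS AND PROOFS =====

theorem bRun_nonneg (c : Char) : ∀ cs : List Char, 0 ≤ (bRun c cs).1 := by
  intro cs
  induction cs with
  | nil => simp [bRun]
  | cons x xs ih =>
    by_cases h : x = c
    · simp only [bRun, if_pos h]; omega
    · simp [bRun, if_neg h]

theorem bRun_rest_head (c : Char) : ∀ cs d tl, (bRun c cs).2 = d :: tl → d ≠ c := by
  intro cs
  induction cs with
  | nil => intro d tl h; simp [bRun] at h
  | cons x xs ih =>
    intro d tl h
    by_cases hx : x = c
    · simp only [bRun, if_pos hx] at h
      exact ih d tl h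
    · simp only [bRun, if_neg hx] at h
      cases h
      exact hx

-- A's fold, started mid-run on (i, some c, j), consumes the run that bRun
-- identifies and arrives at best = max i (j + run length)
theorem bRun_cons_self (c : Char) (xs : List Char) :
    bRun c (c :: xs) = ((bRun c xs).1 + 1, (bRun c xs).2) := by
  simp [bRun]

theorem bRun_cons_ne {x c : Char} (h : ¬ x = c) (xs : List Char) :
    bRun c (x :: xs) = (0, x :: xs) := by
  simp [bRun, h]

theorem aStep_match (i j : Int) (x : Char) :
    aStep (i, some x, j) x = (max i (j + 1), some x, j + 1) := by
  simp only [aStep, Prod.mk.injEq]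
  refine ⟨?_, rfl, rfl⟩
  split_ifs <;> omega

-- A's fold, started mid-run on (i, some c, j), consumes the run that bRun
-- identifies and arrives at best = max i (j + run length)
theorem a_consume_run (c : Char) :
    ∀ (cs : List Char) (i j : Int), j ≤ i →
      List.foldl aStep (i, some c, j) cs =
        List.foldl aStep (max i (j + (bRun c cs).1), some c, j + (bRun c cs).1)
          (bRun c cs).2 := by
  intro cs
  induction cs with
  | nil =>
    intro i j hji
    simp [bRun, max_eq_left hji]
  | cons x xs ih =>
    intro i j hji
    by_cases hx : x = c
    · subst hx
      rw [bRun_cons_self]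
      simp only [List.foldl_cons, aStep_match]
      rw [ih (max i (j + 1)) (j + 1) (le_max_right _ _)]
      have hn := bRun_nonneg x xs
      have h1 : max (max i (j + 1)) (j + 1 + (bRun x xs).1)
           = max i (j + ((bRun x xs).1 + 1)) := by omega
      have h2 : j + 1 + (bRun x xs).1 = j + ((bRun x xs).1 + 1) := by ring
      rw [h1, h2]
    · rw [bRun_cons_ne hx]
      simp [max_eq_left hji]

-- main invariant: from any state whose pending char does not match the head,
-- A's fold computes exactly B's outer loop with accumulator i
theorem a_eq_bGo :
    ∀ (n : Nat) (cs : List Char), cs.length ≤ n →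
      ∀ (i j : Int) (last : Option Char), j ≤ i →
        (∀ d, last = some d → cs.head? ≠ some d) →
        (List.foldl aStep (i, last, j) cs).1 = bGo cs i := by
  intro n
  induction n with
  | zero =>
    intro cs hlen
    have : cs = [] := List.eq_nil_of_length_eq_zero (Nat.le_zero.mp hlen)
    subst this
    intro i j last _ _
    simp [bGo]
  | succ m ih =>
    intro cs hlen i j last hji hhead
    match cs with
    | [] => simp [bGo]
    | c :: tl =>
      have hne : last ≠ some c := by
        intro h
        exact hhead c h (by simp)
      have hstep : aStep (i, last, j) c = (max i 1, some c, 1) := by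
        simp only [aStep, if_neg hne]
        have : (if (1 : Int) > i then (1 : Int) else i) = max i 1 := by omega
        simp [this]
      have hn := bRun_nonneg c tl
      have hrest := bRun_length_le c tl
      have hlen' : (bRun c tl).2.length ≤ m := by
        simp at hlen; omega
      simp only [List.foldl_cons, hstep]
      rw [a_consume_run c tl (max i 1) 1 (le_max_right _ _)]
      have hmax : max (max i 1) (1 + (bRun c tl).1) = max i (1 + (bRun c tl).1) := by
        omega
      rw [hmax]
      rw [ih (bRun c tl).2 hlen' (max i (1 + (bRun c tl).1)) (1 + (bRun c tl).1)
            (some c) (le_max_right _ _)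
            (by
              intro d hd hh
              cases hrest2 : (bRun c tl).2 with
              | nil => simp [hrest2] at hh
              | cons e etl =>
                simp [hrest2] at hh
                have := bRun_rest_head c tl e etl hrest2
                rw [Option.some.injEq] at hd
                subst hd hh
                exact this rfl)]
      show bGo (bRun c tl).2 _ = bGo (c :: tl) i
      rw [bGo]
      have : (if (bRun c tl).1 + 1 > i then (bRun c tl).1 + 1 else i)
           = max i (1 + (bRun c tl).1) := by omega
      rw [this]

-- ===== VERDICT (by name: the statement is the Claim_ definition above) =====
theorem max_id_letters_py_spec : Claim_equal_max_id_letters_py := by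
  intro s _
  unfold Spec_max_id_letters_py max_id_letters_py max_id_letters_py_alt
  exact a_eq_bGo s.toList.length s.toList le_rfl 0 0 none le_rfl (by simp)
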